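-- pv_equiv track=rewrite | github.com/WhiteTrafficLight/SapiensEngine | archive/old_codebase/sapiens_engine/core/local_llm_manager.py | _process_dialogue_text
-- ===== SOURCE A (Python) =====
-- from typing import Dict, List, Any, Tuple, Optional
--
-- def _process_dialogue_text(dialogue_text: str) -> List[Dict[str, str]]:
--     """
--     Process raw dialogue text into structured exchanges.
--
--     Args:
--         dialogue_text: The raw dialogue text generated by the LLM
--
--     Returns:
--         List of dialogue exchanges
--     """
--     exchanges = []
--
--     # Remove any instruction text at the beginning
--     dialogue_parts = dialogue_text.split("\n\n")
--
--     # Split by speaker indicators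
--     current_speaker = None
--     current_text = ""
--
--     for line in dialogue_text.split("\n"):
--         line = line.strip()
--         if not line:
--             continue
--
--         # Check if this is a speaker line
--         speaker_match = None
--         if line.startswith("[") and "]:" in line:
--             parts = line.split("]:", 1)
--             if len(parts) == 2:
--                 speaker = parts[0][1:].strip()
--                 content = parts[1].strip()
--                 speaker_match = (speaker, content)
--         elif ":" in line and not line.startswith("http"):
--             parts = line.split(":", 1)
--             if len(parts) == 2 and len(parts[0].split()) <= 4:  # Simple heuristic for speaker names
--                 speaker = parts[0].strip()
--                 content = parts[1].strip()
--                 speaker_match = (speaker, content)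
--
--         if speaker_match:
--             # Save previous exchange if it exists
--             if current_speaker and current_text:
--                 exchanges.append({
--                     "speaker": current_speaker,
--                     "content": current_text.strip()
--                 })
--
--             # Start new exchange
--             current_speaker = speaker_match[0]
--             current_text = speaker_match[1]
--         else:
--             # Continue current exchange
--             if current_speaker:
--                 current_text += " " + line
--
--     # Add the last exchange
--     if current_speaker and current_text:
--         exchanges.append({
--             "speaker": current_speaker,
--             "content": current_text.strip()
--         })
--
--     return exchanges
-- ===== SOURCE B (Python) =====
-- def _speaker(line):
--     """Speaker heuristic for one stripped non-empty line: (speaker, first_content) or None."""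
--     if line.startswith("["):
--         head, sep, rest = line.partition("]:")
--         if sep:
--             return (head[1:].strip(), rest.strip())
--     if not line.startswith("http"):
--         head, sep, rest = line.partition(":")
--         if sep and len(head.split()) <= 4:
--             return (head.strip(), rest.strip())
--     return None
--
-- def _process_dialogue_text(dialogue_text):
--     lines = [s for s in (ln.strip() for ln in dialogue_text.split("\n")) if s]
--     heads = [_speaker(l) for l in lines]
--     n = len(lines)
--     out = []
--     i = 0
--     # skip any prologue before the first speaker line
--     while i < n and heads[i] is None:
--         i += 1
--     # consume one whole speaker segment per iteration
--     while i < n: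
--         spk, first = heads[i]
--         j = i + 1
--         while j < n and heads[j] is None:
--             j += 1
--         content = " ".join([first] + lines[i + 1:j]).strip()
--         if spk and content:
--             out.append({"speaker": spk, "content": content})
--         i = j
--     return out
-- ===== Notes on version B (the rewrite author's own statement) =====
-- stated objective: alternative
-- what changed: A's single flush-state fold (optional current speaker plus a growing content string, flushed when the next speaker line or the end arrives) is replaced by a segment pass: B precomputes each stripped line's speaker head, then an index loop consumes one whole speaker block per iteration, skipping to the next speaker index and slicing out the continuation lines to join; A's dead paragraph split is dropped.
import Mathlib
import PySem

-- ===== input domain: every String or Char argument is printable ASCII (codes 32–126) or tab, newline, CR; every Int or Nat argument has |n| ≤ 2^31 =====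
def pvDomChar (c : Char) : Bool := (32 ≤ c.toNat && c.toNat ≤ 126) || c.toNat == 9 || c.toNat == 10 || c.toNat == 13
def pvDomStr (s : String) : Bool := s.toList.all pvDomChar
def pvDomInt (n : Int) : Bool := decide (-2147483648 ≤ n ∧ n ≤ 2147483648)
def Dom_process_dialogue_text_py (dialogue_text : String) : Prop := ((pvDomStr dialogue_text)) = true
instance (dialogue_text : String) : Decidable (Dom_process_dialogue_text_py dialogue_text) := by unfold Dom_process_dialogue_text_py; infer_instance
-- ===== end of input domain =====

-- B replaces A's stateful flush-on-next-speaker line fold by a segment pass: precompute each line's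
-- speaker head, then consume one whole speaker block per outer step via index skipping and a slice
-- (same return value; objective: alternative decomposition).

-- ===== PORT A =====
-- A's speaker_match computation for one stripped non-empty line
def pvMatchA (line : List Char) : Option (List Char × List Char) :=
  if PySem.Chars.startswith line ['['] && PySem.Chars.isIn [']', ':'] line then
    match PySem.Chars.splitOnMax line [']', ':'] 1 with
    | [p0, p1] => some (PySem.Chars.strip (PySem.List.slice p0 (some 1) none), PySem.Chars.strip p1)
    | _ => none
  else if PySem.Chars.isIn [':'] line && !PySem.Chars.startswith line ['h', 't', 't', 'p'] then
    match PySem.Chars.splitOnMax line [':'] 1 with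
    | [p0, p1] =>
        if (PySem.Chars.split₀ p0).length ≤ 4 then
          some (PySem.Chars.strip p0, PySem.Chars.strip p1)
        else none
    | _ => none
  else none

-- Python truthiness of current_speaker (None or "" are falsy)
def pvTruthy : Option (List Char) → Bool
  | some s => !s.isEmpty
  | none => false

-- exchanges.append({"speaker": …, "content": current_text.strip()})
def pvFlushA (ex : List (List (String × String))) (s ct : List Char) : List (List (String × String)) :=
  ex ++ [[("speaker", String.ofList s), ("content", String.ofList (PySem.Chars.strip ct))]]

-- A's loop body; state = (exchanges, current_speaker, current_text)
def pvStepA (st : List (List (String × String)) × Option (List Char) × List Char) (raw : List Char) :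
    List (List (String × String)) × Option (List Char) × List Char :=
  let line := PySem.Chars.strip raw
  if line.isEmpty then st
  else
    match pvMatchA line with
    | some (spk, content) =>
        let ex := if pvTruthy st.2.1 && !st.2.2.isEmpty then pvFlushA st.1 (st.2.1.getD []) st.2.2 else st.1
        (ex, some spk, content)
    | none =>
        if pvTruthy st.2.1 then (st.1, st.2.1, st.2.2 ++ ' ' :: line) else st

def process_dialogue_text_py (dialogue_text : String) : List (List (String × String)) :=
  -- dead code in A, kept: dialogue_parts = dialogue_text.split("\n\n")
  let _dialogue_parts := PySem.Chars.splitOn dialogue_text.toList ['\n', '\n']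
  let st := (PySem.Chars.splitOn dialogue_text.toList ['\n']).foldl pvStepA ([], none, [])
  if pvTruthy st.2.1 && !st.2.2.isEmpty then pvFlushA st.1 (st.2.1.getD []) st.2.2 else st.1

-- ===== PORT B =====
-- B's _speaker helper (the same speaker heuristic, necessarily: it defines which lines open a block)
def pvSpeakerB (line : List Char) : Option (List Char × List Char) :=
  if PySem.Chars.startswith line ['['] && PySem.Chars.isIn [']', ':'] line then
    match PySem.Chars.splitOnMax line [']', ':'] 1 with
    | [p0, p1] => some (PySem.Chars.strip (PySem.List.slice p0 (some 1) none), PySem.Chars.strip p1)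
    | _ => none
  else if PySem.Chars.isIn [':'] line && !PySem.Chars.startswith line ['h', 't', 't', 'p'] then
    match PySem.Chars.splitOnMax line [':'] 1 with
    | [p0, p1] =>
        if (PySem.Chars.split₀ p0).length ≤ 4 then
          some (PySem.Chars.strip p0, PySem.Chars.strip p1)
        else none
    | _ => none
  else none

-- B's inner skip loop: while i < n and heads[i] is None: i += 1
def pvSkipB (heads : List (Option (List Char × List Char))) (n : Nat) (i : Nat) : Nat :=
  if _h : i < n ∧ heads.getD i none = none then pvSkipB heads n (i + 1) else i
termination_by n - i
decreasing_by omega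

-- needed for pvOuterB's termination: the skip loop never moves left
theorem pvSkipB_ge (heads : List (Option (List Char × List Char))) (n i : Nat) :
    i ≤ pvSkipB heads n i := by
  unfold pvSkipB
  split
  · have := pvSkipB_ge heads n (i + 1); omega
  · omega
termination_by n - i
decreasing_by omega

-- B's outer while-loop: consume one whole speaker segment per iteration
def pvOuterB (lines : List (List Char)) (heads : List (Option (List Char × List Char))) (n i : Nat) :
    List (List (String × String)) :=
  if _h : i < n then
    match heads.getD i none with
    | some (spk, first) =>
        let j := pvSkipB heads n (i + 1)
        let content := PySem.Chars.strip (PySem.Chars.join [' ']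
          (first :: PySem.List.slice lines (some ((i + 1 : Nat) : Int)) (some ((j : Nat) : Int))))
        (if !spk.isEmpty && !content.isEmpty
          then [[("speaker", String.ofList spk), ("content", String.ofList content)]] else [])
          ++ pvOuterB lines heads n j
    | none => []   -- unreachable: at the top of B's outer loop heads[i] is always a speaker head
  else []
termination_by n - i
decreasing_by have := pvSkipB_ge heads n (i + 1); omega

def process_dialogue_text_py_alt (dialogue_text : String) : List (List (String × String)) :=
  let lines := (PySem.Chars.splitOn dialogue_text.toList ['\n']).filterMap (fun ln =>
      let s := PySem.Chars.strip ln
      if s.isEmpty then none else some s)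
  let heads := lines.map pvSpeakerB
  let n := lines.length
  pvOuterB lines heads n (pvSkipB heads n 0)

-- ===== PRECONDITION & SPEC =====
def Spec_process_dialogue_text_py (dialogue_text : String) (out : List (List (String × String))) : Prop := out = process_dialogue_text_py_alt dialogue_text
instance (dialogue_text : String) (out : List (List (String × String))) : Decidable (Spec_process_dialogue_text_py dialogue_text out) := by unfold Spec_process_dialogue_text_py; infer_instance

-- ===== CLAIM (what is proved, stated in full; the proofs are below) =====
def Claim_equal_process_dialogue_text_py : Prop := ∀ (dialogue_text : String), Dom_process_dialogue_text_py dialogue_text → Spec_process_dialogue_text_py dialogue_text (process_dialogue_text_py dialogue_text)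

-- ===== LEMMAS AND PROOFS =====

theorem pvSpeakerB_eq (line : List Char) : pvSpeakerB line = pvMatchA line := rfl

-- all-whitespace predicate
def pvW (xs : List Char) : Prop := ∀ c ∈ xs, PySem.Chars.isspace c = true

theorem pvW_dropWhile {xs : List Char} (h : pvW (List.dropWhile PySem.Chars.isspace xs)) : pvW xs := by
  intro c hc
  rw [← List.takeWhile_append_dropWhile (p := PySem.Chars.isspace) (l := xs)] at hc
  rcases List.mem_append.mp hc with h1 | h2
  · exact List.mem_takeWhile_imp h1
  · exact h c h2

theorem pvW_reverse {xs : List Char} : pvW xs.reverse ↔ pvW xs := by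
  simp [pvW]

theorem pvW_strip {xs : List Char} (h : pvW (PySem.Chars.strip xs)) : pvW xs := by
  have h1 : pvW (PySem.Chars.lstrip xs) := by
    have := (pvW_reverse.mpr h)
    simp only [PySem.Chars.strip, PySem.Chars.rstrip, List.reverse_reverse] at this
    exact pvW_reverse.mp (pvW_dropWhile this)
  exact pvW_dropWhile h1

theorem pvStrip_eq_nil_iff (xs : List Char) : PySem.Chars.strip xs = [] ↔ pvW xs := by
  constructor
  · intro h
    apply pvW_strip (xs := xs)
    rw [h]; intro c hc; simp at hc
  · intro h
    simp only [PySem.Chars.strip, PySem.Chars.rstrip, PySem.Chars.lstrip]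
    rw [List.reverse_eq_nil_iff, List.dropWhile_eq_nil_iff]
    intro c hc
    apply h
    have := List.dropWhile_sublist (p := PySem.Chars.isspace) (l := xs)
    exact this.mem (List.mem_reverse.mp hc)

theorem pvStrip_not_W {v : List Char} (h : PySem.Chars.strip v ≠ []) : ¬ pvW (PySem.Chars.strip v) := by
  intro hW
  exact h ((pvStrip_eq_nil_iff v).mpr (pvW_strip hW))

theorem pvNotW_append {xs ys : List Char} (h : ¬ pvW ys) : ¬ pvW (xs ++ ys) := by
  intro hW
  exact h (fun c hc => hW c (List.mem_append_right xs hc))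

theorem pvStrip_nil : PySem.Chars.strip ([] : List Char) = [] := rfl

theorem pvMatchA_strip {line s c : List Char} (h : pvMatchA line = some (s, c)) :
    ∃ v, c = PySem.Chars.strip v := by
  unfold pvMatchA at h
  split_ifs at h
  · rcases hsp : PySem.Chars.splitOnMax line [']', ':'] 1 with _ | ⟨p0, _ | ⟨p1, _ | _⟩⟩ <;>
      rw [hsp] at h <;> simp_all
    exact ⟨p1, h.2.symm⟩
  · rcases hsp : PySem.Chars.splitOnMax line [':'] 1 with _ | ⟨p0, _ | ⟨p1, _ | _⟩⟩ <;>
      rw [hsp] at h <;> simp_all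
    exact ⟨p1, h.2.2.symm⟩

-- the content slot of a speaker match is stripped: it is [] or has non-whitespace strip
theorem pvMatchA_inv {line s c : List Char} (h : pvMatchA line = some (s, c)) :
    c = [] ∨ PySem.Chars.strip c ≠ [] := by
  obtain ⟨v, hv⟩ := pvMatchA_strip h
  by_cases hc0 : c = []
  · exact Or.inl hc0
  · right
    intro hsc
    have := pvW_strip (xs := v) (by rw [← hv]; exact (pvStrip_eq_nil_iff c).mp hsc)
    rw [hv] at hc0
    exact hc0 ((pvStrip_eq_nil_iff v).mpr this)

-- absorbing an appended continuation line into the head piece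
theorem pvJoin_absorb (ct x : List Char) (C : List (List Char)) :
    PySem.Chars.join [' '] ((ct ++ ' ' :: x) :: C) = PySem.Chars.join [' '] (ct :: x :: C) := by
  cases C with
  | nil =>
    simp [PySem.Chars.join_singleton, PySem.Chars.join_cons_cons]
  | cons q r =>
    rw [PySem.Chars.join_cons_cons, PySem.Chars.join_cons_cons,
      PySem.Chars.join_cons_cons]
    simp

-- continuation-line predicate for the common characterization
def pvIsCont (l : List Char) : Bool := (pvMatchA l).isNone

-- emit one exchange if speaker and content are truthy
def pvEmitIf (spk content : List Char) : List (List (String × String)) :=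
  if !spk.isEmpty && !content.isEmpty
    then [[("speaker", String.ofList spk), ("content", String.ofList content)]] else []

-- the common characterization: parse one speaker block (speaker line + following continuation
-- lines) at a time
def pvParse : List (List Char) → List (List (String × String))
  | [] => []
  | x :: rest =>
    match pvMatchA x with
    | none => pvParse rest
    | some (s, c) =>
        pvEmitIf s (PySem.Chars.strip (PySem.Chars.join [' '] (c :: rest.takeWhile pvIsCont)))
          ++ pvParse (rest.dropWhile pvIsCont)
termination_by L => L.length
decreasing_by
  · simp
  · have := List.length_dropWhile_le (p := pvIsCont) (l := rest)
    simp; omega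

theorem pvParse_skip_cont (C R : List (List Char)) (hC : ∀ l ∈ C, pvMatchA l = none) :
    pvParse (C ++ R) = pvParse R := by
  induction C with
  | nil => rfl
  | cons c cs ih =>
    rw [List.cons_append, pvParse, hC c (by simp)]
    exact ih (fun l hl => hC l (by simp [hl]))

theorem pvParse_dropWhile (L : List (List Char)) :
    pvParse L = pvParse (L.dropWhile pvIsCont) := by
  conv_lhs => rw [← List.takeWhile_append_dropWhile (p := pvIsCont) (l := L)]
  refine pvParse_skip_cont _ _ (fun l hl => ?_)
  have := List.mem_takeWhile_imp hl
  simpa [pvIsCont, Option.isNone_iff_eq_none] using this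

-- ---------- B side: the index loops compute pvParse ----------

theorem pvHeads_getD (L : List (List Char)) (i : Nat) (hi : i < L.length) :
    (L.map pvSpeakerB).getD i none = pvMatchA L[i] := by
  simp [List.getD, List.getElem?_map, List.getElem?_eq_getElem hi, pvSpeakerB_eq]

theorem pvSkipB_spec (L : List (List Char)) (i : Nat) (_hi : i ≤ L.length) :
    pvSkipB (L.map pvSpeakerB) L.length i = i + ((L.drop i).takeWhile pvIsCont).length := by
  unfold pvSkipB
  split
  · rename_i h
    have hlt : i < L.length := h.1
    have hdrop : L.drop i = L[i] :: L.drop (i + 1) := List.drop_eq_getElem_cons hlt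
    have hnone : pvMatchA L[i] = none := by
      have := h.2; rwa [pvHeads_getD L i hlt] at this
    have hcont : pvIsCont L[i] = true := by simp [pvIsCont, hnone]
    rw [pvSkipB_spec L (i + 1) (by omega)]
    rw [hdrop, List.takeWhile_cons, hcont]
    simp; omega
  · rename_i h
    rcases Nat.lt_or_ge i L.length with hlt | hge
    · have hdrop : L.drop i = L[i] :: L.drop (i + 1) := List.drop_eq_getElem_cons hlt
      have hsome : pvMatchA L[i] ≠ none := by
        intro hn
        exact h ⟨hlt, by rw [pvHeads_getD L i hlt]; exact hn⟩
      have hcont : pvIsCont L[i] = false := by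
        rcases h' : pvMatchA L[i] with _ | v
        · exact absurd h' hsome
        · simp [pvIsCont, h']
      rw [hdrop, List.takeWhile_cons, hcont]
      simp
    · have : L.drop i = [] := List.drop_eq_nil_of_le hge
      rw [this]; simp
termination_by L.length - i
decreasing_by omega

theorem pvOuterB_some (lines : List (List Char)) (heads : List (Option (List Char × List Char)))
    (n i : Nat) (hlt : i < n) (s c : List Char) (hg : heads.getD i none = some (s, c)) :
    pvOuterB lines heads n i
      = (if !s.isEmpty && !(PySem.Chars.strip (PySem.Chars.join [' ']
            (c :: PySem.List.slice lines (some ((i + 1 : Nat) : Int))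
              (some ((pvSkipB heads n (i + 1) : Nat) : Int))))).isEmpty
          then [[("speaker", String.ofList s),
                 ("content", String.ofList (PySem.Chars.strip (PySem.Chars.join [' ']
                   (c :: PySem.List.slice lines (some ((i + 1 : Nat) : Int))
                     (some ((pvSkipB heads n (i + 1) : Nat) : Int))))))]]
          else [])
        ++ pvOuterB lines heads n (pvSkipB heads n (i + 1)) := by
  rw [pvOuterB, dif_pos hlt, hg]

theorem pvOuterB_skip_eq (L : List (List Char)) (i : Nat) (hi : i ≤ L.length) :
    pvOuterB L (L.map pvSpeakerB) L.length (pvSkipB (L.map pvSpeakerB) L.length i)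
      = pvParse (L.drop i) := by
  rw [pvSkipB]
  split
  · rename_i h
    have hlt : i < L.length := h.1
    have hdrop : L.drop i = L[i] :: L.drop (i + 1) := List.drop_eq_getElem_cons hlt
    have hnone : pvMatchA L[i] = none := by
      have := h.2; rwa [pvHeads_getD L i hlt] at this
    rw [pvOuterB_skip_eq L (i + 1) (by omega), hdrop, pvParse, hnone]
  · rename_i h
    rcases Nat.lt_or_ge i L.length with hlt | hge
    · -- heads[i] is a speaker: one outer-loop iteration = one pvParse block
      have hdrop : L.drop i = L[i] :: L.drop (i + 1) := List.drop_eq_getElem_cons hlt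
      have hgetD : (L.map pvSpeakerB).getD i none = pvMatchA L[i] := pvHeads_getD L i hlt
      rcases hm : pvMatchA L[i] with _ | ⟨s, c⟩
      · exact absurd ⟨hlt, by rw [hgetD]; exact hm⟩ h
      · rw [pvOuterB_some L _ _ i hlt s c (by rw [hgetD]; exact hm)]
        have hj := pvSkipB_spec L (i + 1) (by omega)
        set K := ((L.drop (i + 1)).takeWhile pvIsCont).length with hK
        have hKle : K ≤ (L.drop (i + 1)).length := (List.takeWhile_sublist ..).length_le
        have hlen : (L.drop (i + 1)).length = L.length - (i + 1) := List.length_drop ..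
        -- the slice is exactly the continuation block
        have hslice : PySem.List.slice L (some ((i + 1 : Nat) : Int))
            (some ((pvSkipB (L.map pvSpeakerB) L.length (i + 1) : Nat) : Int))
            = (L.drop (i + 1)).takeWhile pvIsCont := by
          rw [hj, PySem.List.slice_natCast]
          have : i + 1 + K - (i + 1) = K := by omega
          rw [this]
          exact (List.prefix_iff_eq_take.mp (List.takeWhile_prefix _)).symm
        rw [hslice]
        -- the recursive call at j computes the rest
        have htail : pvOuterB L (L.map pvSpeakerB) L.length
            (pvSkipB (L.map pvSpeakerB) L.length (i + 1))
            = pvParse ((L.drop (i + 1)).dropWhile pvIsCont) := by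
          rw [pvOuterB_skip_eq L (i + 1) (by omega), pvParse_dropWhile]
        rw [htail, hdrop, pvParse, hm]
        simp [pvEmitIf]
    · have hskip : L.length ≤ i := hge
      rw [pvOuterB, dif_neg (by omega)]
      rw [List.drop_eq_nil_of_le hge, pvParse]
termination_by L.length - i
decreasing_by
  · omega
  · have := pvSkipB_spec L (i + 1) (by omega)
    omega

-- ---------- A side: the flush-state fold computes pvParse ----------

-- A's loop body specialized to an already-stripped non-empty line
def pvStepA' (st : List (List (String × String)) × Option (List Char) × List Char)
    (line : List Char) : List (List (String × String)) × Option (List Char) × List Char :=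
  match pvMatchA line with
  | some (spk, content) =>
      let ex := if pvTruthy st.2.1 && !st.2.2.isEmpty then pvFlushA st.1 (st.2.1.getD []) st.2.2 else st.1
      (ex, some spk, content)
  | none =>
      if pvTruthy st.2.1 then (st.1, st.2.1, st.2.2 ++ ' ' :: line) else st

theorem pvStepA_eq (st : List (List (String × String)) × Option (List Char) × List Char)
    (raw : List Char) :
    pvStepA st raw
      = if (PySem.Chars.strip raw).isEmpty then st else pvStepA' st (PySem.Chars.strip raw) := rfl

def pvStripFilter (raws : List (List Char)) : List (List Char) :=
  raws.filterMap (fun ln =>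
    let s := PySem.Chars.strip ln
    if s.isEmpty then none else some s)

theorem pvFoldA_filter (raws : List (List Char))
    (st : List (List (String × String)) × Option (List Char) × List Char) :
    raws.foldl pvStepA st = (pvStripFilter raws).foldl pvStepA' st := by
  induction raws generalizing st with
  | nil => rfl
  | cons r rs ih =>
    have hc : pvStripFilter (r :: rs)
        = (if (PySem.Chars.strip r).isEmpty then pvStripFilter rs
           else PySem.Chars.strip r :: pvStripFilter rs) := by
      simp only [pvStripFilter, List.filterMap_cons]
      by_cases h : (PySem.Chars.strip r).isEmpty <;> simp [h]
    rw [List.foldl_cons, pvStepA_eq, hc]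
    by_cases h : (PySem.Chars.strip r).isEmpty
    · rw [if_pos h, if_pos h, ih]
    · rw [if_neg h, if_neg h, List.foldl_cons, ih]

theorem pvStripFilter_notW (raws : List (List Char)) :
    ∀ l ∈ pvStripFilter raws, ¬ pvW l := by
  intro l hl
  simp only [pvStripFilter, List.mem_filterMap] at hl
  obtain ⟨v, _, hv⟩ := hl
  by_cases h : (PySem.Chars.strip v).isEmpty
  · simp [h] at hv
  · simp only [h, Bool.false_eq_true, if_false, Option.some.injEq] at hv
    subst hv
    exact pvStrip_not_W (by simpa using h)

-- A's final flush
def pvFinalA (st : List (List (String × String)) × Option (List Char) × List Char) :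
    List (List (String × String)) :=
  if pvTruthy st.2.1 && !st.2.2.isEmpty then pvFlushA st.1 (st.2.1.getD []) st.2.2 else st.1

theorem pvFlush_emit (ex : List (List (String × String))) (s ct : List Char)
    (hs : s ≠ []) (hinv : ct = [] ∨ PySem.Chars.strip ct ≠ []) :
    (if pvTruthy (some s) && !ct.isEmpty then pvFlushA ex s ct else ex)
      = ex ++ pvEmitIf s (PySem.Chars.strip ct) := by
  have hsie : s.isEmpty = false := by simpa using hs
  rcases hinv with h0 | hn
  · subst h0
    simp [pvTruthy, pvEmitIf, pvStrip_nil]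
  · have hctne : ct ≠ [] := fun h0 => hn (by rw [h0]; exact pvStrip_nil)
    have hcie : ct.isEmpty = false := by simpa using hctne
    have hsc : (PySem.Chars.strip ct).isEmpty = false := by simpa using hn
    simp [pvTruthy, pvEmitIf, pvFlushA, hsie, hcie, hsc]

-- the main A-side invariant: from a closed state the fold produces pvParse; from an open state it
-- finishes the current block and then produces pvParse of the remaining blocks
theorem pvAfold (L : List (List Char)) (hL : ∀ l ∈ L, ¬ pvW l) :
    (∀ ex cs ct, pvTruthy cs = false →
        pvFinalA (L.foldl pvStepA' (ex, cs, ct)) = ex ++ pvParse L)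
    ∧ (∀ ex s ct, s ≠ [] → (ct = [] ∨ PySem.Chars.strip ct ≠ []) →
        pvFinalA (L.foldl pvStepA' (ex, some s, ct))
          = ex ++ pvEmitIf s (PySem.Chars.strip (PySem.Chars.join [' '] (ct :: L.takeWhile pvIsCont)))
              ++ pvParse (L.dropWhile pvIsCont)) := by
  induction L with
  | nil =>
    constructor
    · intro ex cs ct hcs
      rw [List.foldl_nil, pvParse]
      simp [pvFinalA, hcs]
    · intro ex s ct hs hinv
      simp only [List.foldl_nil, List.takeWhile_nil, List.dropWhile_nil]
      rw [PySem.Chars.join_singleton, pvParse, List.append_nil]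
      exact pvFlush_emit ex s ct hs hinv
  | cons x rest ih =>
    have hrest : ∀ l ∈ rest, ¬ pvW l := fun l hl => hL l (by simp [hl])
    have ihr := ih hrest
    constructor
    · -- closed state
      intro ex cs ct hcs
      rw [List.foldl_cons]
      rcases hm : pvMatchA x with _ | ⟨s, c⟩
      · have hstep : pvStepA' (ex, cs, ct) x = (ex, cs, ct) := by
          simp [pvStepA', hm, hcs]
        rw [hstep, ihr.1 ex cs ct hcs, pvParse, hm]
      · have hstep : pvStepA' (ex, cs, ct) x = (ex, some s, c) := by
          simp [pvStepA', hm, hcs]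
        rw [hstep]
        by_cases hs : s = []
        · subst hs
          have := ihr.1
          have hcl : pvTruthy (some ([] : List Char)) = false := by simp [pvTruthy]
          rw [ihr.1 ex (some []) c hcl, pvParse, hm]
          rw [pvParse_dropWhile rest]
          simp [pvEmitIf]
        · rw [ihr.2 ex s c hs (pvMatchA_inv hm), pvParse, hm]
          simp
    · -- open state
      intro ex s ct hs hinv
      rw [List.foldl_cons]
      rcases hm : pvMatchA x with _ | ⟨s2, c2⟩
      · -- continuation line: absorb into current text
        have htr : pvTruthy (some s) = true := by simp [pvTruthy, hs]
        have hstep : pvStepA' (ex, some s, ct) x = (ex, some s, ct ++ ' ' :: x) := by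
          simp [pvStepA', hm, htr]
        have hxW : ¬ pvW x := hL x (by simp)
        have hinv' : ct ++ ' ' :: x = [] ∨ PySem.Chars.strip (ct ++ ' ' :: x) ≠ [] := by
          right
          intro h0
          have : pvW (ct ++ ' ' :: x) := (pvStrip_eq_nil_iff _).mp h0
          exact pvNotW_append (xs := ct ++ [' ']) (by simpa using hxW) (by simpa using this)
        rw [hstep, ihr.2 ex s (ct ++ ' ' :: x) hs hinv']
        have hcont : pvIsCont x = true := by simp [pvIsCont, hm]
        rw [List.takeWhile_cons, List.dropWhile_cons]
        simp only [hcont, if_true]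
        rw [pvJoin_absorb]
      · -- next speaker line: the current block is flushed here
        have hstep : pvStepA' (ex, some s, ct) x
            = (ex ++ pvEmitIf s (PySem.Chars.strip ct), some s2, c2) := by
          simp only [pvStepA']
          rw [hm]
          rw [← pvFlush_emit ex s ct hs hinv]
          rfl
        rw [hstep]
        have hcont : pvIsCont x = false := by simp [pvIsCont, hm]
        rw [List.takeWhile_cons, List.dropWhile_cons]
        simp only [hcont, Bool.false_eq_true, if_false]
        rw [PySem.Chars.join_singleton, pvParse, hm]
        by_cases hs2 : s2 = []
        · subst hs2
          have hcl : pvTruthy (some ([] : List Char)) = false := by simp [pvTruthy]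
          rw [ihr.1 _ (some []) c2 hcl, pvParse_dropWhile rest]
          simp [pvEmitIf]
        · rw [ihr.2 _ s2 c2 hs2 (pvMatchA_inv hm)]
          simp

-- ===== VERDICT (by name: the statement is the Claim_ definition above) =====
theorem process_dialogue_text_py_spec : Claim_equal_process_dialogue_text_py := by
  intro dt _
  unfold Spec_process_dialogue_text_py
  show pvFinalA ((PySem.Chars.splitOn dt.toList ['\n']).foldl pvStepA ([], none, []))
      = process_dialogue_text_py_alt dt
  rw [pvFoldA_filter]
  set L := pvStripFilter (PySem.Chars.splitOn dt.toList ['\n']) with hLdef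
  have hA : pvFinalA (L.foldl pvStepA' ([], none, [])) = pvParse L := by
    have := (pvAfold L (pvStripFilter_notW _)).1 [] none [] (by simp [pvTruthy])
    simpa using this
  have hB : process_dialogue_text_py_alt dt = pvParse L := by
    show pvOuterB L (L.map pvSpeakerB) L.length (pvSkipB (L.map pvSpeakerB) L.length 0)
        = pvParse L
    rw [pvOuterB_skip_eq L 0 (by omega)]
    simp
  rw [hA, hB]
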